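-- pv_equiv track=rewrite | github.com/sakir-uncc/ITCS5010_Project_UNCC_ImageGeneration | Deduplication/4_Dataset_summary.py | group_by_top_category
-- ===== SOURCE A (Python) =====
-- from collections import defaultdict
--
-- def group_by_top_category(class_counts):
--     """
--     From class_counts: 'academic_buildings/Fretwell_hall' -> n
--     Returns dict top_category -> (num_classes, total_images)
--     """
--     agg = defaultdict(lambda: {"classes": set(), "images": 0})
--     for cls, n in class_counts.items():
--         top = cls.split("/")[0]
--         agg[top]["classes"].add(cls)
--         agg[top]["images"] += n
--     result = {}
--     for top, info in agg.items():
--         result[top] = {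
--             "num_classes": len(info["classes"]),
--             "total_images": info["images"],
--         }
--     return result
-- ===== SOURCE B (Python) =====
-- def group_by_top_category(class_counts):
--     """
--     From class_counts: 'academic_buildings/Fretwell_hall' -> n
--     Returns dict top_category -> (num_classes, total_images)
--     """
--     tops = list(dict.fromkeys(cls.split("/")[0] for cls in class_counts))
--     return {
--         top: {
--             "num_classes": len({cls for cls in class_counts if cls.split("/")[0] == top}),
--             "total_images": sum(n for cls, n in class_counts.items() if cls.split("/")[0] == top),
--         }
--         for top in tops
--     }
-- ===== Notes on version B (the rewrite author's own statement) =====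
-- stated objective: alternative
-- what changed: A makes one accumulating pass over the dict, maintaining a per-prefix defaultdict of a class set and a running image sum and then reshaping it; B keeps no accumulator dict at all: it first computes the ordered list of distinct top prefixes, then for each prefix rescans the input to count its distinct classes and sum its counts (staged passes with an inner scan instead of a single hash-accumulating pass).
import Mathlib
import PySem

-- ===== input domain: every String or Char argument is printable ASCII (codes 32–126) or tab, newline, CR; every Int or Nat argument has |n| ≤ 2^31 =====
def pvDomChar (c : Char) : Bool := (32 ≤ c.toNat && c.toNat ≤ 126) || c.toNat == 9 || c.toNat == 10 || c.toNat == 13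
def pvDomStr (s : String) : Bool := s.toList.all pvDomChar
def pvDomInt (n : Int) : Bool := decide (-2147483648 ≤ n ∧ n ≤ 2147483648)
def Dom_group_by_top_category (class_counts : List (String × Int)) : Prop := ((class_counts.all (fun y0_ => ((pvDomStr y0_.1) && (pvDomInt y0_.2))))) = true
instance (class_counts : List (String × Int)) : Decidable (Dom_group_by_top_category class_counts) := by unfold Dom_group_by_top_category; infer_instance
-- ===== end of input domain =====

-- B keeps no accumulator dict: it lists the distinct top prefixes in first-appearance order, then rescans the input per prefix for its aggregates; objective: alternative (not faster).

-- cls.split("/")[0]: the separator "/" is nonempty so split? is some, and a split result is always nonempty, so [0] is exactly its head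
def pvTop (s : String) : String := ((PySem.Str.split? s "/").getD []).headD ""

-- ===== PORT A =====
def group_by_top_category (class_counts : List (String × Int)) : List (String × List (String × Int)) :=
  let agg : PySem.Dict String (PySem.Set String × Int) :=
    class_counts.foldl (fun agg p =>
      agg.insert (pvTop p.1)
        (PySem.Set.add (agg.getD (pvTop p.1) (PySem.Set.empty, 0)).1 p.1,
         (agg.getD (pvTop p.1) (PySem.Set.empty, 0)).2 + p.2)) PySem.Dict.empty
  let result : PySem.Dict String (List (String × Int)) :=
    agg.items.foldl (fun r q =>
      r.insert q.1 [("num_classes", (q.2.1.length : Int)), ("total_images", q.2.2)]) PySem.Dict.empty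
  result.items

-- ===== PORT B =====
-- tops = list(dict.fromkeys(...)) is ordered dedup = PySem.List.dedup; each aggregate rescans class_counts
def group_by_top_category_alt (class_counts : List (String × Int)) : List (String × List (String × Int)) :=
  let tops : List String := PySem.List.dedup (class_counts.map (fun p => pvTop p.1))
  (tops.foldl (fun r t =>
      r.insert t
        [("num_classes", ((PySem.Set.ofList ((class_counts.filter (fun p => pvTop p.1 == t)).map (·.1))).length : Int)),
         ("total_images", ((class_counts.filter (fun p => pvTop p.1 == t)).map (·.2)).sum)])
    PySem.Dict.empty).items

-- ===== PRECONDITION & SPEC =====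
def Spec_group_by_top_category (class_counts : List (String × Int)) (out : List (String × List (String × Int))) : Prop := out = group_by_top_category_alt class_counts
instance (class_counts : List (String × Int)) (out : List (String × List (String × Int))) : Decidable (Spec_group_by_top_category class_counts out) := by unfold Spec_group_by_top_category; infer_instance

-- ===== CLAIM (what is proved, stated in full; the proofs are below) =====
def Claim_equal_group_by_top_category : Prop := ∀ (class_counts : List (String × Int)), Dom_group_by_top_category class_counts → Spec_group_by_top_category class_counts (group_by_top_category class_counts)

-- ===== LEMMAS AND PROOFS =====

-- A's accumulation step, named for the lemmas below
def pvStepA (agg : PySem.Dict String (PySem.Set String × Int)) (p : String × Int) :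
    PySem.Dict String (PySem.Set String × Int) :=
  agg.insert (pvTop p.1)
    (PySem.Set.add (agg.getD (pvTop p.1) (PySem.Set.empty, 0)).1 p.1,
     (agg.getD (pvTop p.1) (PySem.Set.empty, 0)).2 + p.2)

lemma pvGetD_foldl_stepA (l : List (String × Int)) (t : String) :
    ∀ d : PySem.Dict String (PySem.Set String × Int),
      (l.foldl pvStepA d).getD t (PySem.Set.empty, 0) =
        (PySem.Set.update (d.getD t (PySem.Set.empty, 0)).1
            ((l.filter (fun p => pvTop p.1 == t)).map (·.1)),
         (d.getD t (PySem.Set.empty, 0)).2 +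
            ((l.filter (fun p => pvTop p.1 == t)).map (·.2)).sum) := by
  induction l with
  | nil => intro d; simp [PySem.Set.update]
  | cons p l ih =>
    intro d
    simp only [List.foldl_cons, ih, pvStepA, List.filter_cons, PySem.Dict.getD_insert]
    by_cases h : pvTop p.1 = t
    · simp [h, PySem.Set.update, add_assoc]
    · simp [if_neg (Ne.symm h), h]

lemma pvKeys_foldl_stepA (l : List (String × Int)) :
    (l.foldl pvStepA PySem.Dict.empty).keys = PySem.List.dedup (l.map (fun p => pvTop p.1)) := by
  have h := PySem.Dict.keys_foldl_insert_key (l := l) (key := fun p => pvTop p.1)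
      (f := fun agg p =>
        (PySem.Set.add (agg.getD (pvTop p.1) (PySem.Set.empty, 0)).1 p.1,
         (agg.getD (pvTop p.1) (PySem.Set.empty, 0)).2 + p.2))
      (d := PySem.Dict.empty)
  simpa [pvStepA, PySem.Dict.keys_empty, PySem.Set.update_nil_left] using h

-- A's first loop, characterized: the items list pairs each top (first appearance order) with its class set and image sum
lemma pvItems_foldl_stepA (l : List (String × Int)) :
    (l.foldl pvStepA PySem.Dict.empty).items =
      (PySem.List.dedup (l.map (fun p => pvTop p.1))).map (fun t =>
        (t, (PySem.Set.ofList ((l.filter (fun p => pvTop p.1 == t)).map (·.1)),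
             ((l.filter (fun p => pvTop p.1 == t)).map (·.2)).sum))) := by
  have hnd : (l.foldl pvStepA PySem.Dict.empty).keys.Nodup := by
    have := PySem.Dict.nodup_keys_foldl_insert_key (l := l) (key := fun p => pvTop p.1)
        (f := fun agg p =>
          (PySem.Set.add (agg.getD (pvTop p.1) (PySem.Set.empty, 0)).1 p.1,
           (agg.getD (pvTop p.1) (PySem.Set.empty, 0)).2 + p.2))
        (d := PySem.Dict.empty) (PySem.Dict.nodup_keys_empty)
    simpa [pvStepA] using this
  rw [PySem.Dict.items_eq_map_keys _ hnd (PySem.Set.empty, 0), pvKeys_foldl_stepA]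
  refine List.map_congr_left (fun t ht => ?_)
  rw [pvGetD_foldl_stepA]
  simp [PySem.Set.update_nil_left]

-- a fold that inserts pairwise-distinct keys into an empty dict just appends: its items are a map
lemma pvItems_rebuild {ν ρ : Type} (pairs : List (String × ν)) (v : String × ν → ρ)
    (hnd : (pairs.map (fun q => q.1)).Nodup) :
    (pairs.foldl (fun r q => r.insert q.1 (v q)) (PySem.Dict.empty : PySem.Dict String ρ)).items
      = pairs.map (fun q => (q.1, v q)) := by
  have h := PySem.Dict.items_foldl_insert_fresh (l := pairs) (k := fun q => q.1) (v := v)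
      (d := PySem.Dict.empty) (by intro a _; simp [PySem.Dict.contains_empty]) hnd
  simpa using h

-- B's comprehension: inserting a value for each of the distinct tops in order is that map
lemma pvItems_comprehension {ρ : Type} (ks : List String) (v : String → ρ)
    (hnd : ks.Nodup) :
    (ks.foldl (fun r t => r.insert t (v t)) (PySem.Dict.empty : PySem.Dict String ρ)).items
      = ks.map (fun t => (t, v t)) := by
  have h := PySem.Dict.items_foldl_insert_fresh (l := ks) (k := fun t => t) (v := v)
      (d := PySem.Dict.empty) (by intro a _; simp [PySem.Dict.contains_empty])
      (by simpa using hnd)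
  simpa using h

-- ===== VERDICT (by name: the statement is the Claim_ definition above) =====
theorem group_by_top_category_spec : Claim_equal_group_by_top_category := by
  intro l _
  show group_by_top_category l = group_by_top_category_alt l
  unfold group_by_top_category group_by_top_category_alt
  have hA : l.foldl (fun agg p =>
      agg.insert (pvTop p.1)
        (PySem.Set.add (agg.getD (pvTop p.1) (PySem.Set.empty, 0)).1 p.1,
         (agg.getD (pvTop p.1) (PySem.Set.empty, 0)).2 + p.2)) PySem.Dict.empty
      = l.foldl pvStepA PySem.Dict.empty := rfl
  have hndA : (((l.foldl pvStepA PySem.Dict.empty).items).map (fun q => q.1)).Nodup := by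
    rw [pvItems_foldl_stepA, List.map_map]
    simp [Function.comp_def]
  rw [hA, pvItems_rebuild _ _ hndA,
      pvItems_comprehension _ _ (PySem.List.nodup_dedup _),
      pvItems_foldl_stepA]
  simp [List.map_map, Function.comp_def]
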